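-- pv_equiv track=rewrite | github.com/ritugala/automatic-question-generation-from-videos | main.py | generate_text
-- ===== SOURCE A (Python) =====
-- def generate_text(text):
-- 	timestamped_text = {}
-- 	all_text = ""
-- 	split_text = text.split('\n')
--
-- 	for i in range(len(split_text) - 1):
-- 		if i % 2 == 0:
-- 			timestamped_text[split_text[i]] = split_text[i + 1]
-- 		else:
-- 			all_text += " " + split_text[i]
--
-- 	all_text = all_text.lstrip()
-- 	return timestamped_text, all_text
-- ===== SOURCE B (Python) =====
-- def generate_text(text):
-- 	split = text.split('\n')
-- 	timestamped_text = dict(zip(split[0::2], split[1::2]))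
-- 	all_text = ' '.join(split[1:len(split) - 1:2]).lstrip()
-- 	return timestamped_text, all_text
-- ===== Notes on version B (the rewrite author's own statement) =====
-- stated objective: idiomatic
-- what changed: A's single index loop over range(len-1) with parity branches and string concatenation is replaced by two strided-slice passes: the dict is built by zipping the even-indexed lines with the odd-indexed ones, and the text by space-joining the odd-indexed lines excluding the last line, then left-stripping.
import Mathlib
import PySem

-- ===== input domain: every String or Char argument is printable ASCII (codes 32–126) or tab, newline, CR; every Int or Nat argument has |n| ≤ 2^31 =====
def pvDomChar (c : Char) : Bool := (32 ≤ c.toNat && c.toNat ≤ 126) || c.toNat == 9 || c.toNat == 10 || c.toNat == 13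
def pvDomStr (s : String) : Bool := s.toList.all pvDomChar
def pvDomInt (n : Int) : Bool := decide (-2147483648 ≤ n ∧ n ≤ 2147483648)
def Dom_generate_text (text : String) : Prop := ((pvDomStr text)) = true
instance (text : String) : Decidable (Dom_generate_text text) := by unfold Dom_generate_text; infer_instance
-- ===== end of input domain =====

-- B replaces A's single index loop with interleaved parity branches by two strided-slice passes:
-- the dict from zipping the even- and odd-indexed lines, the text by space-joining the middle
-- odd-indexed lines and left-stripping (objective: idiomatic).

-- ===== PORT A =====
-- loop body of A's 'for i in range(len(split_text) - 1)'; all_text is carried as a List Char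
def pvBodyA (split_text : List String) (st : PySem.Dict String String × List Char) (i : Int) :
    PySem.Dict String String × List Char :=
  if PySem.Int.mod i 2 = 0 then
    (st.1.insert (PySem.List.pyGetD split_text i "") (PySem.List.pyGetD split_text (i + 1) ""), st.2)
  else
    (st.1, st.2 ++ (' ' :: (PySem.List.pyGetD split_text i "").toList))

def generate_text (text : String) : (List (String × String)) × String :=
  let split_text := (PySem.Str.split? text "\n").getD []  -- sep "\n" ≠ "", so split? is always some
  let st := (PySem.List.pyRange 0 ((split_text.length : Int) - 1) 1).foldl (pvBodyA split_text)
      (PySem.Dict.empty, [])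
  (st.1.items, String.ofList (PySem.Chars.lstrip st.2))

-- ===== PORT B =====
def generate_text_alt (text : String) : (List (String × String)) × String :=
  let split := (PySem.Str.split? text "\n").getD []  -- sep "\n" ≠ "", so split? is always some
  let evens := (PySem.List.slice? split none none 2).getD []      -- split[0::2]; step 2 ≠ 0, always some
  let odds := (PySem.List.slice? split (some 1) none 2).getD []   -- split[1::2]
  let timestamped_text := PySem.Dict.ofList (evens.zip odds)
  let mids := (PySem.List.slice? split (some 1) (some ((split.length : Int) - 1)) 2).getD []  -- split[1:len-1:2]
  (timestamped_text.items, PySem.Str.lstrip (PySem.Str.join " " mids))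

-- ===== PRECONDITION & SPEC =====
def Spec_generate_text (text : String) (out : (List (String × String)) × String) : Prop := out = generate_text_alt text
instance (text : String) (out : (List (String × String)) × String) : Decidable (Spec_generate_text text out) := by unfold Spec_generate_text; infer_instance

-- ===== CLAIM (what is proved, stated in full; the proofs are below) =====
def Claim_equal_generate_text : Prop := ∀ (text : String), Dom_generate_text text → Spec_generate_text text (generate_text text)

-- ===== LEMMAS AND PROOFS =====

-- elements of l at even indices 0,2,…
def pvEvens {α : Type} : List α → List α
  | [] => []
  | [a] => [a]
  | a :: _ :: rest => a :: pvEvens rest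

-- elements of l at odd indices 1,3,…
def pvOdds {α : Type} : List α → List α
  | _ :: b :: rest => b :: pvOdds rest
  | _ => []

-- elements of l at odd indices i with i < l.length - 1
def pvMids {α : Type} : List α → List α
  | _ :: b :: rest => if rest = [] then [] else b :: pvMids rest
  | _ => []

theorem pvRange_shift2 (a b : Int) :
    PySem.List.pyRange (a + 2) (b + 2) 1 = (PySem.List.pyRange a b 1).map (· + 2) := by
  by_cases h : a < b
  · rw [PySem.List.pyRange_one_cons h, PySem.List.pyRange_one_cons (by omega : a + 2 < b + 2),
      List.map_cons, show a + 2 + 1 = a + 1 + 2 by ring, pvRange_shift2 (a + 1) b]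
  · rw [PySem.List.pyRange_one_eq_nil (by omega), PySem.List.pyRange_one_eq_nil (by omega)]
    rfl
termination_by (b - a).toNat
decreasing_by omega

theorem pvGetD_shift {α : Type} (x : α) (xs : List α) (i : Int) (h : 0 ≤ i) (d : α) :
    PySem.List.pyGetD (x :: xs) (i + 1) d = PySem.List.pyGetD xs i d := by
  lift i to ℕ using h
  rw [show ((i : Int) + 1) = ((i + 1 : ℕ) : Int) by push_cast; ring]
  rw [PySem.List.pyGetD_natCast, PySem.List.pyGetD_natCast]
  rfl

theorem pvGetD0 {α : Type} (x : α) (xs : List α) (d : α) :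
    PySem.List.pyGetD (x :: xs) 0 d = x := by
  simp

theorem pvGetD1 {α : Type} (x y : α) (xs : List α) (d : α) :
    PySem.List.pyGetD (x :: y :: xs) 1 d = y := by
  have h := PySem.List.pyGetD_natCast (x :: y :: xs) 1 d
  simpa using h

theorem pvMod2_shift (i : Int) : PySem.Int.mod (i + 2) 2 = PySem.Int.mod i 2 := by
  rw [PySem.Int.mod_eq_emod_of_pos (by norm_num), PySem.Int.mod_eq_emod_of_pos (by norm_num)]
  omega

-- slice? step-2 results written as filterMap over an index range
theorem pvFilter_evens {α : Type} : ∀ (l : List α),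
    List.filterMap (fun k => l[2 * k]?) (List.range ((l.length + 1) / 2)) = pvEvens l
  | [] => by simp [pvEvens]
  | [a] => by simp [pvEvens]
  | a :: b :: rest => by
    have hc : (a :: b :: rest).length + 1 = (rest.length + 1) + 2 := by simp
    rw [hc, show ((rest.length + 1) + 2) / 2 = (rest.length + 1) / 2 + 1 by omega,
      List.range_succ_eq_map, List.filterMap_cons, List.filterMap_map,
      show pvEvens (a :: b :: rest) = a :: pvEvens rest from rfl]
    rw [show (2 * 0) = 0 by rfl]
    simp only [List.getElem?_cons_zero, Function.comp_def]
    have hk : ∀ k : ℕ, (a :: b :: rest)[2 * Nat.succ k]? = rest[2 * k]? := by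
      intro k
      rw [show 2 * Nat.succ k = 2 * k + 1 + 1 by omega]
      simp
    simp only [hk]
    rw [pvFilter_evens rest]

theorem pvFilter_odds {α : Type} : ∀ (l : List α),
    List.filterMap (fun k => l[2 * k + 1]?) (List.range (l.length / 2)) = pvOdds l
  | [] => by simp [pvOdds]
  | [a] => by simp [pvOdds]
  | a :: b :: rest => by
    have hc : (a :: b :: rest).length = rest.length + 2 := by simp
    rw [hc, show (rest.length + 2) / 2 = rest.length / 2 + 1 by omega,
      List.range_succ_eq_map, List.filterMap_cons, List.filterMap_map,
      show pvOdds (a :: b :: rest) = b :: pvOdds rest from rfl]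
    rw [show (2 * 0 + 1) = 1 by rfl]
    simp only [List.getElem?_cons_succ, List.getElem?_cons_zero, Function.comp_def]
    have hk : ∀ k : ℕ, (b :: rest)[2 * Nat.succ k]? = rest[2 * k + 1]? := by
      intro k
      rw [show 2 * Nat.succ k = (2 * k + 1) + 1 by omega]
      simp
    simp only [hk]
    rw [pvFilter_odds rest]

theorem pvFilter_mids {α : Type} : ∀ (l : List α),
    List.filterMap (fun k => l[2 * k + 1]?) (List.range ((l.length - 1) / 2)) = pvMids l
  | [] => by simp [pvMids]
  | [a] => by simp [pvMids]
  | [a, b] => by simp [pvMids]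
  | a :: b :: c :: rest' => by
    have hdiv : ((a :: b :: c :: rest').length - 1) / 2 = ((c :: rest').length - 1) / 2 + 1 := by
      simp
      omega
    rw [hdiv, List.range_succ_eq_map, List.filterMap_cons, List.filterMap_map,
      show pvMids (a :: b :: c :: rest') = b :: pvMids (c :: rest') from by simp [pvMids]]
    rw [show (2 * 0 + 1) = 1 by rfl]
    simp only [List.getElem?_cons_succ, List.getElem?_cons_zero, Function.comp_def]
    have hk : ∀ k : Nat, (b :: c :: rest')[2 * Nat.succ k]? = (c :: rest')[2 * k + 1]? := by
      intro k
      rw [show 2 * Nat.succ k = (2 * k + 1) + 1 by omega]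
      simp
    simp only [hk]
    rw [pvFilter_mids (c :: rest')]

-- evaluation of B's three slices
theorem pvSlice_evens {α : Type} (l : List α) :
    (PySem.List.slice? l none none 2).getD [] = pvEvens l := by
  rw [← pvFilter_evens l]
  simp only [PySem.List.slice?, PySem.List.sliceIndices]
  norm_num
  refine congrArg₂ List.filterMap ?_ (congrArg List.range ?_)
  · funext k
    rw [show ((2 : Int) * (k : ℕ)).toNat = 2 * k by omega]
  · split_ifs <;> omega

theorem pvSlice_odds {α : Type} (l : List α) :
    (PySem.List.slice? l (some 1) none 2).getD [] = pvOdds l := by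
  match l with
  | [] => rfl
  | x :: xs =>
    rw [← pvFilter_odds (x :: xs)]
    simp only [PySem.List.slice?, PySem.List.sliceIndices]
    norm_num
    refine congrArg₂ List.filterMap ?_ (congrArg List.range ?_)
    · funext k
      rw [show ((1 : Int) + 2 * (k : ℕ)).toNat = 2 * k + 1 by omega]
      simp
    · split_ifs <;> omega

theorem pvSlice_mids {α : Type} (l : List α) :
    (PySem.List.slice? l (some 1) (some ((l.length : Int) - 1)) 2).getD [] = pvMids l := by
  match l with
  | [] => rfl
  | x :: xs =>
    rw [← pvFilter_mids (x :: xs)]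
    simp only [PySem.List.slice?, PySem.List.sliceIndices]
    norm_num
    rw [if_neg (show ¬((xs.length : Int) < 0) by omega)]
    refine congrArg₂ List.filterMap ?_ (congrArg List.range ?_)
    · funext k
      rw [show ((1 : Int) + 2 * (k : ℕ)).toNat = 2 * k + 1 by omega]
      simp
    · split_ifs <;> omega

-- A's loop in closed form
theorem pvLoopA : ∀ (l : List String) (d : PySem.Dict String String) (cs : List Char),
    (PySem.List.pyRange 0 ((l.length : Int) - 1) 1).foldl (pvBodyA l) (d, cs)
      = (d.update ((pvEvens l).zip (pvOdds l)), cs ++ (pvMids l).flatMap (fun s => ' ' :: s.toList))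
  | [], d, cs => by
    rw [PySem.List.pyRange_one_eq_nil (by norm_num)]
    simp [pvEvens, pvOdds, pvMids, PySem.Dict.update]
  | [a], d, cs => by
    rw [PySem.List.pyRange_one_eq_nil (by norm_num)]
    simp [pvEvens, pvOdds, pvMids, PySem.Dict.update]
  | a :: b :: rest, d, cs => by
    have hlen : ((a :: b :: rest).length : Int) - 1 = (rest.length : Int) + 1 := by
      push_cast [List.length_cons]
      ring
    rw [hlen, PySem.List.pyRange_one_cons (by omega : (0 : Int) < (rest.length : Int) + 1),
      zero_add]
    match rest with
    | [] =>
      rw [PySem.List.pyRange_one_eq_nil (by norm_num)]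
      simp only [List.foldl_cons, List.foldl_nil, pvBodyA]
      rw [if_pos (by decide), pvGetD0, zero_add, pvGetD1]
      simp [pvEvens, pvOdds, pvMids, PySem.Dict.update]
    | c :: rest' =>
      rw [PySem.List.pyRange_one_cons (by push_cast [List.length_cons]; omega :
        (1 : Int) < ((c :: rest').length : Int) + 1)]
      simp only [List.foldl_cons]
      rw [show pvBodyA (a :: b :: c :: rest') (d, cs) 0 = (d.insert a b, cs) from by
          simp only [pvBodyA]
          rw [if_pos (by decide), pvGetD0, zero_add, pvGetD1]]
      rw [show pvBodyA (a :: b :: c :: rest') (d.insert a b, cs) 1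
            = (d.insert a b, cs ++ (' ' :: b.toList)) from by
          simp only [pvBodyA]
          rw [if_neg (by decide), pvGetD1]]
      have hsh : PySem.List.pyRange (1 + 1) (((c :: rest').length : Int) + 1) 1
          = (PySem.List.pyRange 0 (((c :: rest').length : Int) - 1) 1).map (· + 2) := by
        have h := pvRange_shift2 0 (((c :: rest').length : Int) - 1)
        rw [show ((c :: rest').length : Int) - 1 + 2 = ((c :: rest').length : Int) + 1 by ring,
          show (0 : Int) + 2 = 1 + 1 by norm_num] at h
        exact h
      rw [hsh, List.foldl_map]
      have hcg : ∀ (acc : PySem.Dict String String × List Char) (i : Int),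
          i ∈ PySem.List.pyRange 0 (((c :: rest').length : Int) - 1) 1 →
          pvBodyA (a :: b :: c :: rest') acc (i + 2) = pvBodyA (c :: rest') acc i := by
        intro acc i hi
        have h0 : 0 ≤ i := (PySem.List.mem_pyRange_one.mp hi).1
        simp only [pvBodyA, pvMod2_shift]
        rw [show i + 2 = (i + 1) + 1 by ring,
          pvGetD_shift _ _ _ (by omega), pvGetD_shift _ _ _ h0,
          pvGetD_shift _ _ _ (by omega), pvGetD_shift _ _ _ (by omega)]
      first
      | rw [PySem.List.foldl_congr_mem _ hcg]
      | rw [PySem.List.foldl_congr_mem _ _ _ _ hcg]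
      rw [pvLoopA (c :: rest') (d.insert a b) (cs ++ (' ' :: b.toList))]
      rw [show pvEvens (a :: b :: c :: rest') = a :: pvEvens (c :: rest') from rfl,
        show pvOdds (a :: b :: c :: rest') = b :: pvOdds (c :: rest') from rfl,
        show pvMids (a :: b :: c :: rest') = b :: pvMids (c :: rest') from by simp [pvMids],
        List.zip_cons_cons, List.flatMap_cons]
      simp [PySem.Dict.update]

-- ' '-prefixed concatenation vs ' '.join, under lstrip
theorem pvFlat_join : ∀ (m : String) (ms : List String),
    ((m :: ms).flatMap (fun s => ' ' :: s.toList))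
      = ' ' :: PySem.Chars.join [' '] ((m :: ms).map String.toList)
  | m, [] => by simp [PySem.Chars.join_singleton]
  | m, q :: ms => by
    rw [List.map_cons, List.map_cons, PySem.Chars.join_cons_cons]
    have h := pvFlat_join q ms
    rw [List.flatMap_cons, h]
    simp

theorem pvLstrip_cons_space (cs : List Char) :
    PySem.Chars.lstrip (' ' :: cs) = PySem.Chars.lstrip cs := by
  simp only [PySem.Chars.lstrip]
  rw [List.dropWhile_cons_of_pos]
  decide

theorem pvString_part (ms : List String) :
    String.ofList (PySem.Chars.lstrip (ms.flatMap (fun s => ' ' :: s.toList)))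
      = PySem.Str.lstrip (PySem.Str.join " " ms) := by
  rw [PySem.Str.lstrip]
  congr 1
  rw [PySem.Str.toList_join]
  match ms with
  | [] => rfl
  | m :: ms => rw [pvFlat_join m ms, show (" ").toList = [' '] from rfl, pvLstrip_cons_space]

theorem pvMain (text : String) : generate_text text = generate_text_alt text := by
  simp only [generate_text, generate_text_alt]
  rw [pvLoopA, pvSlice_evens, pvSlice_odds, pvSlice_mids]
  refine Prod.ext ?_ ?_
  · simp [PySem.Dict.ofList]
  · simpa using pvString_part (pvMids ((PySem.Str.split? text "\n").getD []))

-- ===== VERDICT (by name: the statement is the Claim_ definition above) =====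
theorem generate_text_spec : Claim_equal_generate_text := by
  intro text _
  unfold Spec_generate_text
  exact pvMain text
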